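-- pv_equiv track=rewrite | github.com/cosmoparadox/mathematical-tools | livelock_complete.py | _perm_cycles
-- ===== SOURCE A (Python) =====
-- def _perm_cycles(M, labels):
--     """Extract permutation cycles from a bijective matrix."""
--     n = len(M)
--     succ = {i: next(j for j in range(n) if M[i][j]) for i in range(n)}
--     vis = set(); cycs = []
--     for s in range(n):
--         if s in vis: continue
--         c = []; cur = s
--         while cur not in vis:
--             vis.add(cur); c.append(labels[cur]); cur = succ[cur]
--         if c: cycs.append(c)
--     return cycs
-- ===== SOURCE B (Python) =====
-- def _perm_cycles(M, labels):
--     """Extract permutation cycles from a bijective matrix."""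
--     n = len(M)
--     comp = [None] * n   # cycle representative (the start that reached the node)
--     seq = []            # nodes in order of first visit
--     for s in range(n):
--         cur = s
--         while comp[cur] is None:
--             comp[cur] = s
--             seq.append(cur)
--             j = 0
--             while not M[cur][j]:
--                 j += 1
--             cur = j
--     # reconstruct cycles from the labeling: a node opens a new cycle
--     # exactly when it is its own representative
--     cycs = []
--     for v in seq:
--         if comp[v] == v:
--             cycs.append([labels[v]])
--         else:
--             cycs[-1].append(labels[v])
--     return cycs
-- ===== Notes on version B (the rewrite author's own statement) =====
-- stated objective: alternative
-- what changed: Cycle lists are no longer built during the traversal: a first pass only labels every node with its cycle representative and records the visit order (successors scanned on demand, no precomputed dict), and a second pass reconstructs the cycles from that labeling, opening a new cycle exactly when a node is its own representative.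
import Mathlib
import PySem

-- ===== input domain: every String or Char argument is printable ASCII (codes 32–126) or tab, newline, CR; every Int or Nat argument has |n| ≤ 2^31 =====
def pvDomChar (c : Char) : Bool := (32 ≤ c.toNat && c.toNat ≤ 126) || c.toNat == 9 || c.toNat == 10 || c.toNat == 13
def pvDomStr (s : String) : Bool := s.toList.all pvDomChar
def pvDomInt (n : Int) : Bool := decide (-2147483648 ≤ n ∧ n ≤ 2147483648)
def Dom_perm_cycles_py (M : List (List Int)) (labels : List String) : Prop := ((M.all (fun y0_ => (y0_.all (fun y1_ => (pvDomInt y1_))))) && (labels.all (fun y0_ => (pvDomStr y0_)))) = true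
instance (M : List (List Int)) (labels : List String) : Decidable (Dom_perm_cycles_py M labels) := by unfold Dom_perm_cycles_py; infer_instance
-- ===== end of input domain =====

-- B replaces A's inline cycle building with a two-phase scheme: a traversal pass only
-- labels each node with its cycle representative and records the visit order (successors
-- scanned on demand, no dict), then the cycles are reconstructed from that labeling.


-- ===== PORT A =====
-- next(j for j in range(n) if M[i][j]); `none` (StopIteration) / an out-of-range read
-- (IndexError) are excluded by Pre_, so the out-of-range default 0 is never decisive.
def pvNextJ (row : List Int) (n : Nat) : Nat :=
  match (List.range n).find? (fun j => row.getD j 0 ≠ 0) with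
  | some j => j
  | none => 0

-- succ = {i: next(j for j in range(n) if M[i][j]) for i in range(n)}
def pvSuccA (M : List (List Int)) (n : Nat) : PySem.Dict Nat Nat :=
  (List.range n).foldl (fun d i => d.insert i (pvNextJ (M.getD i []) n)) PySem.Dict.empty

-- while cur not in vis: vis.add(cur); c.append(labels[cur]); cur = succ[cur]
-- (fuel n+1 suffices under Pre_; labels[cur] is in range under Pre_, default never used)
def pvWalkA (succ : PySem.Dict Nat Nat) (labels : List String) :
    Nat → Nat → PySem.Set Nat → List String → PySem.Set Nat × List String
  | 0, _, vis, c => (vis, c)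
  | fuel+1, cur, vis, c =>
      if PySem.Set.contains vis cur then (vis, c)
      else pvWalkA succ labels fuel (succ.getD cur 0) (PySem.Set.add vis cur) (c ++ [labels.getD cur ""])

def perm_cycles_py (M : List (List Int)) (labels : List String) : List (List String) :=
  let n := M.length
  let succ := pvSuccA M n
  let st := (List.range n).foldl
    (fun (st : PySem.Set Nat × List (List String)) s =>
      if PySem.Set.contains st.1 s then st
      else
        let r := pvWalkA succ labels (n+1) s st.1 []
        if r.2 ≠ [] then (r.1, st.2 ++ [r.2]) else (r.1, st.2))
    (PySem.Set.empty, [])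
  st.2

-- ===== PORT B =====
-- j = 0; while not M[cur][j]: j += 1   — structural scan of the row (an all-zero row
-- is a Python IndexError, excluded by Pre_; there the port returns 0)
def pvFirstHit : List Int → Nat
  | [] => 0
  | x :: r => if x ≠ 0 then 0 else pvFirstHit r + 1

-- while comp[cur] is None: comp[cur] = s; seq.append(cur); cur = first hit of row cur
-- (fuel n+1 suffices under Pre_)
def pvWalkB (M : List (List Int)) (s : Nat) :
    Nat → Nat → List (Option Nat) → List Nat → List (Option Nat) × List Nat
  | 0, _, comp, seq => (comp, seq)
  | fuel+1, cur, comp, seq =>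
      if (comp.getD cur none).isSome then (comp, seq)
      else pvWalkB M s fuel (pvFirstHit (M.getD cur [])) (comp.set cur (some s)) (seq ++ [cur])

-- if comp[v] == v: cycs.append([labels[v]]) else: cycs[-1].append(labels[v])
-- (cycs[-1] on empty cycs would be a Python IndexError; under Pre_ the else branch is
-- only reached with nonempty cycs, so the getLastD default is never decisive)
def pvPhase2Step (comp : List (Option Nat)) (labels : List String)
    (cycs : List (List String)) (v : Nat) : List (List String) :=
  if comp.getD v none = some v then cycs ++ [[labels.getD v ""]]
  else cycs.dropLast ++ [cycs.getLastD [] ++ [labels.getD v ""]]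

def perm_cycles_py_alt (M : List (List Int)) (labels : List String) : List (List String) :=
  let n := M.length
  let st := (List.range n).foldl
    (fun (st : List (Option Nat) × List Nat) s => pvWalkB M s (n+1) s st.1 st.2)
    (List.replicate n none, [])
  st.2.foldl (pvPhase2Step st.1 labels) []

-- ===== PRECONDITION & SPEC =====
-- Pre_ = exactly the inputs where Python A returns: labels covers all n nodes (else
-- IndexError) and every row has a nonzero entry at some index < n within the row
-- (else the generator raises IndexError or StopIteration).
def Pre_perm_cycles_py (M : List (List Int)) (labels : List String) : Prop :=
  M.length ≤ labels.length ∧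
  ∀ row ∈ M, ∃ j < M.length, j < row.length ∧ row.getD j 0 ≠ 0
instance (M : List (List Int)) (labels : List String) : Decidable (Pre_perm_cycles_py M labels) := by
  unfold Pre_perm_cycles_py; infer_instance

def pvWitness_perm_cycles_py : List (List Int) × List String := ([[0, 1], [1, 0]], ["a", "b"])

def Spec_perm_cycles_py (M : List (List Int)) (labels : List String) (out : List (List String)) : Prop := out = perm_cycles_py_alt M labels
instance (M : List (List Int)) (labels : List String) (out : List (List String)) : Decidable (Spec_perm_cycles_py M labels out) := by unfold Spec_perm_cycles_py; infer_instance

-- ===== CLAIM (what is proved, stated in full; the proofs are below) =====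
def Claim_equal_perm_cycles_py : Prop := ∀ (M : List (List Int)) (labels : List String), Dom_perm_cycles_py M labels → Pre_perm_cycles_py M labels → Spec_perm_cycles_py M labels (perm_cycles_py M labels)

-- ===== LEMMAS AND PROOFS =====

-- the on-demand scan finds the least nonzero index of the row
theorem pvFirstHit_least (row : List Int) (k : Nat)
    (hk : k < row.length) (hnz : row.getD k 0 ≠ 0) :
    pvFirstHit row ≤ k ∧ pvFirstHit row < row.length ∧
    row.getD (pvFirstHit row) 0 ≠ 0 ∧ ∀ m < pvFirstHit row, row.getD m 0 = 0 := by
  induction row generalizing k with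
  | nil => simp at hk
  | cons x r ih =>
      by_cases hx : x ≠ 0
      · refine ⟨?_, ?_, ?_, ?_⟩ <;> simp [pvFirstHit, hx]
      · rw [not_not] at hx
        cases k with
        | zero => simp [hx] at hnz
        | succ k =>
            have := ih k (by simpa using hk) (by simpa using hnz)
            refine ⟨?_, ?_, ?_, ?_⟩
            · simp [pvFirstHit, hx]; omega
            · simp [pvFirstHit, hx]; omega
            · simpa [pvFirstHit, hx] using this.2.2.1
            · intro m hm
              cases m with
              | zero => simp [hx]
              | succ m =>
                  simp only [pvFirstHit, hx] at hm
                  have := this.2.2.2 m (by simp at hm; omega)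
                  simpa [List.getD] using this

-- A's range-bounded generator agrees with B's unbounded scan under Pre_
theorem pvNextJ_eq (row : List Int) (n : Nat)
    (h : ∃ j < n, j < row.length ∧ row.getD j 0 ≠ 0) :
    pvNextJ row n = pvFirstHit row ∧ pvFirstHit row < n := by
  obtain ⟨j, hjn, hjl, hnz⟩ := h
  obtain ⟨hle, hlt, hfnz, hmin⟩ := pvFirstHit_least row j hjl hnz
  have hfn : pvFirstHit row < n := lt_of_le_of_lt hle hjn
  refine ⟨?_, hfn⟩
  unfold pvNextJ
  have hfind : (List.range n).find? (fun j => row.getD j 0 ≠ 0) = some (pvFirstHit row) := by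
    rw [List.find?_eq_some_iff_getElem]
    refine ⟨by simpa using hfnz, pvFirstHit row, by simpa using hfn, by simp, ?_⟩
    intro m hm
    have h0 : row.getD m 0 = 0 := hmin m (by simpa using hm)
    simp [List.getD] at h0
    simp [List.getD, h0]
  rw [hfind]

-- lookup in a dict built by inserting f j for j in range(n)
theorem pvFold_insert_getD (f : Nat → Nat) (n : Nat) :
    ∀ i < n, ∀ d : PySem.Dict Nat Nat,
      ((List.range n).foldl (fun d j => d.insert j (f j)) d).getD i 0 = f i := by
  induction n with
  | zero => intro i hi; omega
  | succ n ih =>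
      intro i hi d
      rw [List.range_succ, List.foldl_append]
      simp only [List.foldl_cons, List.foldl_nil]
      rw [PySem.Dict.getD_insert]
      by_cases h : i = n
      · simp [h]
      · simp only [h, if_false]
        exact ih i (by omega) d

-- succ dictionary lookup
theorem pvSuccA_getD (M : List (List Int)) (n i : Nat) (hi : i < n) :
    (pvSuccA M n).getD i 0 = pvNextJ (M.getD i []) n := by
  unfold pvSuccA
  exact pvFold_insert_getD (fun i => pvNextJ (M.getD i []) n) n i hi PySem.Dict.empty

-- coupling invariant between A's visited set and B's component array:
-- visited = labeled
def pvLink (n : Nat) (vis : PySem.Set Nat) (comp : List (Option Nat)) : Prop :=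
  comp.length = n ∧ ∀ j < n, PySem.Set.contains vis j = (comp.getD j none).isSome

theorem pvLink_set (n cur s : Nat) (vis : PySem.Set Nat) (comp : List (Option Nat))
    (hinv : pvLink n vis comp) (hc : cur < n) :
    pvLink n (PySem.Set.add vis cur) (comp.set cur (some s)) := by
  obtain ⟨hlen, hmem⟩ := hinv
  refine ⟨by simp [hlen], ?_⟩
  intro j hj
  have hA : PySem.Set.contains (PySem.Set.add vis cur) j =
      (decide (j = cur) || PySem.Set.contains vis j) := by
    by_cases h : j = cur
    · subst h
      have t1 := (PySem.Set.contains_iff (PySem.Set.add vis j) j).mpr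
        ((PySem.Set.mem_add _ _ _).mpr (Or.inr rfl))
      rw [t1]; simp
    · by_cases h2 : j ∈ vis
      · have t1 := (PySem.Set.contains_iff (PySem.Set.add vis cur) j).mpr
          ((PySem.Set.mem_add _ _ _).mpr (Or.inl h2))
        have t2 := (PySem.Set.contains_iff vis j).mpr h2
        rw [t1, t2]; simp
      · have e1 : PySem.Set.contains (PySem.Set.add vis cur) j = false := by
          rw [Bool.eq_false_iff]; intro hcc
          rcases (PySem.Set.mem_add _ _ _).mp ((PySem.Set.contains_iff _ _).mp hcc) with h' | h'
          exacts [h2 h', h h']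
        have e2 : PySem.Set.contains vis j = false := by
          rw [Bool.eq_false_iff]; intro hcc; exact h2 ((PySem.Set.contains_iff _ _).mp hcc)
        rw [e1, e2]; simp [h]
  rw [hA]
  by_cases h : j = cur
  · subst h
    simp [List.getD, show j < comp.length by omega]
  · rw [List.getD, List.getElem?_set_ne (fun he => h he.symm)]
    simp only [h, decide_false, Bool.false_or]
    exact hmem j hj

-- the two walks stay coupled: B appends a block of fresh nodes to seq, labels them
-- all with s, and A appends exactly the labels of that block to c
theorem pvWalk_couple (M : List (List Int)) (labels : List String)
    (hrows : ∀ row ∈ M, ∃ j < M.length, j < row.length ∧ row.getD j 0 ≠ 0) :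
    ∀ (fuel cur s : Nat) (vis : PySem.Set Nat) (comp : List (Option Nat))
      (c : List String) (seq : List Nat),
      pvLink M.length vis comp → cur < M.length →
      ∃ block : List Nat,
        (pvWalkB M s fuel cur comp seq).2 = seq ++ block ∧
        (pvWalkA (pvSuccA M M.length) labels fuel cur vis c).2
          = c ++ block.map (fun v => labels.getD v "") ∧
        pvLink M.length (pvWalkA (pvSuccA M M.length) labels fuel cur vis c).1
          (pvWalkB M s fuel cur comp seq).1 ∧
        (∀ v, (comp.getD v none).isSome →
          (pvWalkB M s fuel cur comp seq).1.getD v none = comp.getD v none) ∧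
        (∀ u ∈ block, (pvWalkB M s fuel cur comp seq).1.getD u none = some s ∧
          comp.getD u none = none) := by
  intro fuel
  induction fuel with
  | zero =>
      intro cur s vis comp c seq hinv _
      exact ⟨[], by simp [pvWalkB], by simp [pvWalkA], hinv, fun v _ => rfl, by simp⟩
  | succ fuel ih =>
      intro cur s vis comp c seq hinv hcur
      have hvis : PySem.Set.contains vis cur = (comp.getD cur none).isSome :=
        hinv.2 cur hcur
      by_cases h : (comp.getD cur none).isSome = true
      · have h' : (comp[cur]?.getD none).isSome = true := by simpa [List.getD] using h
        have hmem : cur ∈ vis := (PySem.Set.contains_iff _ _).mp (by rw [hvis]; exact h)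
        have eA : pvWalkA (pvSuccA M M.length) labels (fuel+1) cur vis c = (vis, c) := by
          simp [pvWalkA, hmem]
        have eB : pvWalkB M s (fuel+1) cur comp seq = (comp, seq) := by
          simp [pvWalkB, h']
        exact ⟨[], by rw [eB]; simp, by rw [eA]; simp, by rw [eA, eB]; exact hinv,
          fun v _ => by rw [eB], by simp⟩
      · have hnone : comp.getD cur none = none := by
          cases hcn : comp.getD cur none with
          | none => rfl
          | some x => rw [hcn] at h; simp at h
        have hrow : M.getD cur [] ∈ M := by
          have hg : M.getD cur [] = M[cur]'hcur := List.getD_eq_getElem M [] hcur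
          rw [hg]; exact List.getElem_mem hcur
        have hnext := pvNextJ_eq (M.getD cur []) M.length (hrows _ hrow)
        have hA1 : pvWalkA (pvSuccA M M.length) labels (fuel+1) cur vis c =
            pvWalkA (pvSuccA M M.length) labels fuel (pvFirstHit (M.getD cur []))
              (PySem.Set.add vis cur) (c ++ [labels.getD cur ""]) := by
          simp only [pvWalkA, hvis, h, Bool.false_eq_true, if_false]
          rw [pvSuccA_getD M M.length cur hcur, hnext.1]
        have hB1 : pvWalkB M s (fuel+1) cur comp seq =
            pvWalkB M s fuel (pvFirstHit (M.getD cur []))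
              (comp.set cur (some s)) (seq ++ [cur]) := by
          simp only [pvWalkB, h, Bool.false_eq_true, if_false]
        obtain ⟨block, hb1, hb2, hb3, hb4, hb5⟩ :=
          ih (pvFirstHit (M.getD cur [])) s (PySem.Set.add vis cur)
            (comp.set cur (some s)) (c ++ [labels.getD cur ""]) (seq ++ [cur])
            (pvLink_set M.length cur s vis comp hinv hcur) hnext.2
        have hclen : cur < comp.length := by rw [hinv.1]; exact hcur
        have hset_self : (comp.set cur (some s)).getD cur none = some s := by
          simp [List.getD, hclen]
        refine ⟨cur :: block, ?_, ?_, ?_, ?_, ?_⟩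
        · rw [hB1, hb1]; simp
        · rw [hA1, hb2]; simp
        · rw [hA1, hB1]; exact hb3
        · intro v hv
          have hvc : v ≠ cur := by
            intro he; rw [he, hnone] at hv; simp at hv
          have he : (comp.set cur (some s)).getD v none = comp.getD v none := by
            rw [List.getD, List.getElem?_set_ne (fun he2 => hvc he2.symm)]; rfl
          rw [hB1, hb4 v (by rw [he]; exact hv), he]
        · intro u hu
          rcases List.mem_cons.mp hu with he | hm
          · subst he
            constructor
            · rw [hB1, hb4 u (by rw [hset_self]; rfl), hset_self]
            · exact hnone
          · have h1 := (hb5 u hm).1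
            have h2 := (hb5 u hm).2
            have huc : u ≠ cur := by
              intro he; rw [he, hset_self] at h2; simp at h2
            have he : (comp.set cur (some s)).getD u none = comp.getD u none := by
              rw [List.getD, List.getElem?_set_ne (fun he2 => huc he2.symm)]; rfl
            constructor
            · rw [hB1]; exact h1
            · rw [← he]; exact h2

-- phase 2 only reads comp at the nodes of seq
theorem pvPhase2_congr (labels : List String) (comp comp' : List (Option Nat)) :
    ∀ (seq : List Nat) (acc : List (List String)),
      (∀ v ∈ seq, comp.getD v none = comp'.getD v none) →
      seq.foldl (pvPhase2Step comp labels) acc = seq.foldl (pvPhase2Step comp' labels) acc := by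
  intro seq
  induction seq with
  | nil => intro acc _; rfl
  | cons v seq ih =>
      intro acc h
      simp only [List.foldl_cons]
      have he : pvPhase2Step comp labels acc v = pvPhase2Step comp' labels acc v := by
        unfold pvPhase2Step; rw [h v List.mem_cons_self]
      rw [he]
      exact ih _ (fun u hu => h u (List.mem_cons_of_mem _ hu))

-- phase 2 over a block of non-leaders appends their labels to the last cycle
theorem pvPhase2_rest (labels : List String) (comp : List (Option Nat)) (s : Nat) :
    ∀ (rest : List Nat) (X : List (List String)) (last : List String),
      (∀ u ∈ rest, comp.getD u none = some s ∧ u ≠ s) →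
      rest.foldl (pvPhase2Step comp labels) (X ++ [last])
        = X ++ [last ++ rest.map (fun v => labels.getD v "")] := by
  intro rest
  induction rest with
  | nil => intro X last _; simp
  | cons u rest ih =>
      intro X last h
      obtain ⟨hu, hus⟩ := h u List.mem_cons_self
      have hne : ¬ comp.getD u none = some u := by
        rw [hu]; intro he
        exact hus (Option.some.inj he).symm
      simp only [List.foldl_cons, pvPhase2Step, hne, if_false,
        List.dropLast_concat, List.getLastD_concat]
      rw [ih X (last ++ [labels.getD u ""]) (fun v hv => h v (List.mem_cons_of_mem _ hv))]
      simp

-- the outer loops stay coupled: A's cycle list equals phase 2 applied to B's state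
theorem pvFold_couple (M : List (List Int)) (labels : List String)
    (hrows : ∀ row ∈ M, ∃ j < M.length, j < row.length ∧ row.getD j 0 ≠ 0) :
    ∀ (l : List Nat), (∀ t ∈ l, t < M.length) →
    ∀ (vis : PySem.Set Nat) (comp : List (Option Nat))
      (cycs : List (List String)) (seq : List Nat),
      pvLink M.length vis comp →
      (∀ v ∈ seq, (comp.getD v none).isSome) →
      cycs = seq.foldl (pvPhase2Step comp labels) [] →
      (l.foldl (fun (st : PySem.Set Nat × List (List String)) t =>
          if PySem.Set.contains st.1 t then st
          else
            let r := pvWalkA (pvSuccA M M.length) labels (M.length+1) t st.1 []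
            if r.2 ≠ [] then (r.1, st.2 ++ [r.2]) else (r.1, st.2)) (vis, cycs)).2
      = (l.foldl (fun (st : List (Option Nat) × List Nat) t =>
            pvWalkB M t (M.length+1) t st.1 st.2) (comp, seq)).2.foldl
          (pvPhase2Step
            (l.foldl (fun (st : List (Option Nat) × List Nat) t =>
              pvWalkB M t (M.length+1) t st.1 st.2) (comp, seq)).1 labels) [] := by
  intro l
  induction l with
  | nil =>
      intro _ vis comp cycs seq _ _ hcycs
      simpa using hcycs
  | cons t l ih =>
      intro hl vis comp cycs seq hinv hseq hcycs
      have ht : t < M.length := hl t List.mem_cons_self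
      have hvis : PySem.Set.contains vis t = (comp.getD t none).isSome := hinv.2 t ht
      simp only [List.foldl_cons]
      by_cases h : (comp.getD t none).isSome = true
      · -- A skips via `continue`; B's walk stops immediately, state unchanged
        have h' : (comp[t]?.getD none).isSome = true := by simpa [List.getD] using h
        have hB : pvWalkB M t (M.length+1) t comp seq = (comp, seq) := by
          simp [pvWalkB, h']
        rw [hB]
        simp only [hvis, h, if_true]
        exact ih (fun u hu => hl u (List.mem_cons_of_mem _ hu)) vis comp cycs seq hinv hseq hcycs
      · have hnone : comp.getD t none = none := by
          cases hcn : comp.getD t none with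
          | none => rfl
          | some x => rw [hcn] at h; simp at h
        have hvisf : PySem.Set.contains vis t = false := by rw [hvis, hnone]; rfl
        have hrow : M.getD t [] ∈ M := by
          have hg : M.getD t [] = M[t]'ht := List.getD_eq_getElem M [] ht
          rw [hg]; exact List.getElem_mem ht
        have hnext := pvNextJ_eq (M.getD t []) M.length (hrows _ hrow)
        have hclen : t < comp.length := by rw [hinv.1]; exact ht
        have hset_self : (comp.set t (some t)).getD t none = some t := by
          simp [List.getD, hclen]
        -- unfold both loops one step
        have hA1 : pvWalkA (pvSuccA M M.length) labels (M.length+1) t vis [] =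
            pvWalkA (pvSuccA M M.length) labels M.length (pvFirstHit (M.getD t []))
              (PySem.Set.add vis t) [labels.getD t ""] := by
          simp only [pvWalkA, hvisf, Bool.false_eq_true, if_false, List.nil_append]
          rw [pvSuccA_getD M M.length t ht, hnext.1]
        have hB1 : pvWalkB M t (M.length+1) t comp seq =
            pvWalkB M t M.length (pvFirstHit (M.getD t []))
              (comp.set t (some t)) (seq ++ [t]) := by
          simp only [pvWalkB, h, Bool.false_eq_true, if_false]
        obtain ⟨block, hb1, hb2, hb3, hb4, hb5⟩ :=
          pvWalk_couple M labels hrows M.length (pvFirstHit (M.getD t [])) t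
            (PySem.Set.add vis t) (comp.set t (some t)) [labels.getD t ""] (seq ++ [t])
            (pvLink_set M.length t t vis comp hinv ht) hnext.2
        set comp' := (pvWalkB M t M.length (pvFirstHit (M.getD t []))
          (comp.set t (some t)) (seq ++ [t])).1 with hcomp'
        -- comp' agrees with comp on everything comp already labels
        have hstab : ∀ v, (comp.getD v none).isSome → comp'.getD v none = comp.getD v none := by
          intro v hv
          have hvc : v ≠ t := by
            intro he; rw [he, hnone] at hv; simp at hv
          have he : (comp.set t (some t)).getD v none = comp.getD v none := by
            rw [List.getD, List.getElem?_set_ne (fun he2 => hvc he2.symm)]; rfl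
          rw [hb4 v (by rw [he]; exact hv), he]
        have ht' : comp'.getD t none = some t := by
          rw [hb4 t (by rw [hset_self]; rfl), hset_self]
        -- A's walk produced a nonempty cycle
        have hr2 : (pvWalkA (pvSuccA M M.length) labels (M.length+1) t vis []).2
            = (t :: block).map (fun v => labels.getD v "") := by
          rw [hA1, hb2]; simp
        have hr2ne : (pvWalkA (pvSuccA M M.length) labels (M.length+1) t vis []).2 ≠ [] := by
          rw [hr2]; simp
        simp only [hvisf, Bool.false_eq_true, if_false, hr2ne, ne_eq,
          not_false_eq_true, if_true]
        rw [hB1, hA1]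
        -- apply the induction hypothesis to the new coupled state
        refine ih (fun u hu => hl u (List.mem_cons_of_mem _ hu)) _ _ _ _ hb3 ?_ ?_
        · -- every node of the new seq is labeled in comp'
          intro v hv
          rw [hb1] at hv
          rcases List.mem_append.mp hv with hv | hv
          · rcases List.mem_append.mp hv with hv | hv
            · rw [hstab v (hseq v hv)]; exact hseq v hv
            · have : v = t := by simpa using hv
              rw [this, ht']; rfl
          · rw [(hb5 v hv).1]; rfl
        · -- A's new cycle list = phase 2 of the new seq under comp'
          rw [hb1, ← hA1, hr2, List.append_assoc, List.foldl_append]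
          have hcongr : seq.foldl (pvPhase2Step comp' labels) []
              = seq.foldl (pvPhase2Step comp labels) [] := by
            exact (pvPhase2_congr labels comp comp' seq []
              (fun v hv => (hstab v (hseq v hv)).symm)).symm
          rw [hcongr, ← hcycs]
          -- the new block: leader t then non-leaders
          have hrest : ∀ u ∈ block, comp'.getD u none = some t ∧ u ≠ t := by
            intro u hu
            refine ⟨(hb5 u hu).1, ?_⟩
            intro he
            have := (hb5 u hu).2
            rw [he, hset_self] at this
            simp at this
          have hstep : pvPhase2Step comp' labels cycs t = cycs ++ [[labels.getD t ""]] := by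
            unfold pvPhase2Step; rw [ht']; simp
          rw [← hcomp', List.singleton_append, List.foldl_cons, hstep,
            pvPhase2_rest labels comp' t block cycs [labels.getD t ""] hrest]
          simp

-- ===== VERDICT (by name: the statement is the Claim_ definition above) =====
theorem perm_cycles_py_spec : Claim_equal_perm_cycles_py := by
  intro M labels _hDom hPre
  obtain ⟨_hlab, hrows⟩ := hPre
  unfold Spec_perm_cycles_py perm_cycles_py perm_cycles_py_alt
  have hinv0 : pvLink M.length PySem.Set.empty (List.replicate M.length none) := by
    refine ⟨List.length_replicate, ?_⟩
    intro j hj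
    simp [List.getD, hj, PySem.Set.empty, PySem.Set.contains]
  exact pvFold_couple M labels hrows (List.range M.length)
    (fun s hs => List.mem_range.mp hs) PySem.Set.empty (List.replicate M.length none)
    [] [] hinv0 (by simp) rfl
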